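-- pv_equiv track=rewrite | github.com/jmc9/2D_TRT_ROM_System | Decomposer/Testing/Grid_Handling.py | dcalc
-- ===== SOURCE A (Python) =====
-- def dcalc(dlist):
--     l = 1
--     c = False
--     for d in dlist:
--         if d != 0: l = l * d
--         if d == 1: c = True
--     if ((l == 1)and(not c)):
--         return 0
--     else:
--         return l
-- ===== SOURCE B (Python) =====
-- def dcalc(dlist):
--     # Frequency table first, then product of powers over the distinct nonzero values.
--     cnt = {}
--     for d in dlist:
--         cnt[d] = cnt.get(d, 0) + 1
--     p = 1
--     for v, k in cnt.items():
--         if v != 0: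
--             p *= v ** k
--     return 0 if p == 1 and cnt.get(1, 0) == 0 else p
-- ===== Notes on version B (the rewrite author's own statement) =====
-- stated objective: alternative
-- what changed: Replaces A's single fused scan (running product + seen-one flag) with a frequency dictionary: B counts occurrences of each value, multiplies v**count over the distinct nonzero keys, and reads the one-flag off the table as cnt.get(1,0).
import Mathlib
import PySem

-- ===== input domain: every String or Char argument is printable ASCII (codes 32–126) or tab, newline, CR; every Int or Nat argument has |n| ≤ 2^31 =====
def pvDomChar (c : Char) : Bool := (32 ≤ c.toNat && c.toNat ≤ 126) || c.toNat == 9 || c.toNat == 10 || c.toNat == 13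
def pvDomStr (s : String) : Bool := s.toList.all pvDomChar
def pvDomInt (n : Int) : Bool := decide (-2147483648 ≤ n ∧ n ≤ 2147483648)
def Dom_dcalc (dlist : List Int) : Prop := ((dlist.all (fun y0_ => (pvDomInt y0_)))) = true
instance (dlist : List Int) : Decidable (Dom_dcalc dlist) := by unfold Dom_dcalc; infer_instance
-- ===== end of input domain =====

-- B computes the same result via a frequency dictionary (count each value, multiply
-- v^count over the distinct nonzero keys, read the one-flag off the table) instead of
-- A's fused single scan; objective: alternative.

-- ===== PORT A =====
-- literal port of A: one loop carrying the product l and the seen-one flag c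
def dcalc (dlist : List Int) : Int :=
  let st := dlist.foldl
    (fun (s : Int × Bool) d =>
      (if d ≠ 0 then s.1 * d else s.1, if d = 1 then true else s.2))
    (1, false)
  if st.1 = 1 ∧ st.2 = false then 0 else st.1

-- ===== PORT B =====
-- literal port of B: build the frequency dict (cnt[d] = cnt.get(d,0)+1), then fold
-- v^count over its items for v ≠ 0, then test cnt.get(1,0) == 0
def dcalc_alt (dlist : List Int) : Int :=
  let cnt := dlist.foldl (fun d x => d.insert x (d.getD x 0 + 1)) (PySem.Dict.empty : PySem.Dict Int Int)
  let p := cnt.items.foldl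
    (fun (acc : Int) vk => if vk.1 ≠ 0 then acc * vk.1 ^ vk.2.toNat else acc) 1
  if p = 1 ∧ cnt.getD 1 0 = 0 then 0 else p

-- ===== PRECONDITION & SPEC =====
def Spec_dcalc (dlist : List Int) (out : Int) : Prop := out = dcalc_alt dlist
instance (dlist : List Int) (out : Int) : Decidable (Spec_dcalc dlist out) := by unfold Spec_dcalc; infer_instance

-- ===== CLAIM (what is proved, stated in full; the proofs are below) =====
def Claim_equal_dcalc : Prop := ∀ (dlist : List Int), Dom_dcalc dlist → Spec_dcalc dlist (dcalc dlist)

-- ===== LEMMAS AND PROOFS =====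

-- A's loop state equals (acc * product of the nonzero filter, flag || (1 ∈ xs))
theorem dcalc_loop_eq (xs : List Int) (l : Int) (c : Bool) :
    xs.foldl
      (fun (s : Int × Bool) d =>
        (if d ≠ 0 then s.1 * d else s.1, if d = 1 then true else s.2))
      (l, c)
    = (l * (xs.filter (fun x => x ≠ 0)).prod, c || decide ((1 : Int) ∈ xs)) := by
  induction xs generalizing l c with
  | nil => simp
  | cons d t ih =>
    simp only [List.foldl_cons, ih, List.filter_cons, List.mem_cons, Prod.mk.injEq]
    constructor
    · by_cases hd : d = 0
      · simp [hd]
      · simp only [hd, if_true, ne_eq, not_false_eq_true, decide_true, List.prod_cons]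
        ring
    · by_cases h1 : d = 1 <;> simp [h1, eq_comm]

-- B's items fold factors out the accumulator into a product of mapped factors
theorem foldl_pow_factor (xs : List (Int × Int)) (a : Int) :
    xs.foldl (fun (acc : Int) vk => if vk.1 ≠ 0 then acc * vk.1 ^ vk.2.toNat else acc) a
    = a * (xs.map (fun vk => if vk.1 ≠ 0 then vk.1 ^ vk.2.toNat else 1)).prod := by
  induction xs generalizing a with
  | nil => simp
  | cons x t ih =>
    simp only [List.foldl_cons, List.map_cons, List.prod_cons, ih]
    by_cases hx : x.1 = 0
    · simp [hx]
    · simp [hx]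
      ring

-- the product of v^count over the distinct values equals the nonzero-filtered product
theorem prod_pow_count (dlist : List Int) :
    ((PySem.Set.ofList dlist).map
      (fun k => if k ≠ 0 then k ^ dlist.count k else 1)).prod
    = (dlist.filter (fun x => x ≠ 0)).prod := by
  have hnd : (PySem.Set.ofList dlist).Nodup := PySem.Set.nodup_ofList dlist
  have hfin : (PySem.Set.ofList dlist).toFinset = dlist.toFinset := by
    ext x; simp [PySem.Set.mem_ofList]
  rw [← List.prod_toFinset _ hnd, hfin,
      Finset.prod_list_count (dlist.filter (fun x => x ≠ 0)),
      List.toFinset_filter, Finset.prod_filter]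
  refine Finset.prod_congr rfl ?_
  intro x _
  by_cases hx : x = 0
  · simp [hx]
  · simp [hx]

-- ===== VERDICT (by name: the statement is the Claim_ definition above) =====
theorem dcalc_spec : Claim_equal_dcalc := by
  intro dlist _
  unfold Spec_dcalc dcalc dcalc_alt
  dsimp only
  rw [dcalc_loop_eq, PySem.Dict.foldl_insert_getD_add_one_eq_counter,
      PySem.Dict.items_counter, foldl_pow_factor, List.map_map]
  have hmap : ((fun vk : Int × Int => if vk.1 ≠ 0 then vk.1 ^ vk.2.toNat else 1) ∘
      (fun k : Int => (k, (dlist.count k : Int))))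
      = fun k => if k ≠ 0 then k ^ dlist.count k else 1 := by
    funext k; simp
  rw [hmap, prod_pow_count, PySem.Dict.getD_counter]
  by_cases hp : (dlist.filter (fun x => x ≠ 0)).prod = 1 <;>
  by_cases hm : (1 : Int) ∈ dlist <;>
  simp [hm, List.count_eq_zero]
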